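-- pv_equiv track=rewrite | github.com/codegod100/syncer | syncer.py | _parse_sessions
-- ===== SOURCE A (Python) =====
-- from typing import Optional, List, Dict, Tuple
--
-- def _parse_sessions(output: str) -> List[Dict]:
--     """Parse mutagen session list output."""
--     sessions = []
--     current = {}
--     section = None  # Track which section we're in (source, destination, alpha, beta)
--
--     for line in output.split('\n'):
--         stripped = line.strip()
--         if not stripped:
--             continue
--
--         if stripped.startswith('---'):
--             # Session separator
--             if current and current.get('identifier'):
--                 sessions.append(current)
--             current = {}
--             section = None
--         elif stripped.startswith('Identifier:'):
--             current['identifier'] = stripped.split(':', 1)[1].strip()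
--         elif stripped.startswith('Name:'):
--             current['name'] = stripped.split(':', 1)[1].strip()
--         elif stripped in ('Source:', 'Destination:', 'Alpha:', 'Beta:'):
--             section = stripped.rstrip(':').lower()
--         elif ':' in stripped and current:
--             # Parse key: value
--             key_val = stripped.split(':', 1)
--             key = key_val[0].strip().lower()
--             value = key_val[1].strip() if len(key_val) > 1 else ''
--
--             if key == 'url' and section:
--                 if section == 'source':
--                     current['source'] = value
--                 elif section == 'destination':
--                     current['destination'] = value
--                 elif section == 'alpha':
--                     current['alpha'] = value
--                 elif section == 'beta':
--                     current['beta'] = value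
--             elif key == 'status':
--                 current['status'] = value
--
--     if current and current.get('identifier'):
--         sessions.append(current)
--
--     return sessions
-- ===== SOURCE B (Python) =====
-- from typing import List, Dict
--
--
-- def _parse_block(lines: List[str]) -> Dict:
--     """Parse one session block (contains no separator lines) into a dict."""
--     current = {}
--     section = None
--     for line in lines:
--         stripped = line.strip()
--         if not stripped:
--             continue
--         if stripped.startswith('Identifier:'):
--             current['identifier'] = stripped.split(':', 1)[1].strip()
--         elif stripped.startswith('Name:'):
--             current['name'] = stripped.split(':', 1)[1].strip()
--         elif stripped in ('Source:', 'Destination:', 'Alpha:', 'Beta:'):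
--             section = stripped.rstrip(':').lower()
--         elif ':' in stripped and current:
--             key_val = stripped.split(':', 1)
--             key = key_val[0].strip().lower()
--             value = key_val[1].strip() if len(key_val) > 1 else ''
--             if key == 'url' and section:
--                 if section == 'source':
--                     current['source'] = value
--                 elif section == 'destination':
--                     current['destination'] = value
--                 elif section == 'alpha':
--                     current['alpha'] = value
--                 elif section == 'beta':
--                     current['beta'] = value
--             elif key == 'status':
--                 current['status'] = value
--     return current
--
--
-- def _parse_sessions(output: str) -> List[Dict]:
--     """Parse mutagen session list output."""
--     # Phase 1: partition the lines into blocks at '---' separator lines.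
--     blocks = []
--     block = []
--     for line in output.split('\n'):
--         if line.strip().startswith('---'):
--             blocks.append(block)
--             block = []
--         else:
--             block.append(line)
--     blocks.append(block)
--     # Phase 2: parse each block; keep the ones that carry an identifier.
--     sessions = []
--     for b in blocks:
--         d = _parse_block(b)
--         if d and d.get('identifier'):
--             sessions.append(d)
--     return sessions
-- ===== Notes on version B (the rewrite author's own statement) =====
-- stated objective: alternative
-- what changed: Replaced A's single flat accumulating loop (shared mutable current/section state flushed at separators) by a two-phase pipeline: partition the lines into separator-delimited blocks, then map an independent per-block parser over them and keep the identifier-bearing dicts.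
import Mathlib
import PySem

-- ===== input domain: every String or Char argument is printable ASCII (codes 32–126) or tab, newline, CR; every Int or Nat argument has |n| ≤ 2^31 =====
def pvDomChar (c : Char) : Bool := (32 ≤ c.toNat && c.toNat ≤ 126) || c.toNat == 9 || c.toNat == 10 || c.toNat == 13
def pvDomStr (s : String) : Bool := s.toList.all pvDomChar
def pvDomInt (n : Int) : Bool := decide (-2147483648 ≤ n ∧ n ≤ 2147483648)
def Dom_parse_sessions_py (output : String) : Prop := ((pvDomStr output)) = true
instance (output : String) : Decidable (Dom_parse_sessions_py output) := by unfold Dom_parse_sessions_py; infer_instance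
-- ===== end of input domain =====

-- B replaces A's single flat accumulating loop by a partition-into-blocks-then-map-a-block-parser
-- pipeline (different decomposition, same cost); return values are proved equal on all inputs.

-- ===== PORT A =====
-- shared per-line helpers: both Pythons contain this identical line-handling code
-- (Source A inline in its loop, Source B inside _parse_block); ported once, used by both ports.

-- s.split(':', 1); sep ":" is nonempty so splitMax? always returns some
def pvSplit1 (s : String) : List String := (PySem.Str.splitMax? s ":" 1).getD [s]

-- xs[1] where the caller's guard ensures the index exists (startswith/':' in stripped)
def pvIdx1 (xs : List String) : String := (PySem.List.pyGet? xs 1).getD ""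

-- hand port of s.rstrip(':') (PySem has no rstrip-with-chars): drop trailing ':' characters; exact
def pvRstripColon (s : String) : String := String.ofList (s.toList.reverse.dropWhile (· == ':')).reverse

-- the branch cascade both Pythons run on a non-empty, non-separator stripped line
def pvProcLine (st : PySem.Dict String String × Option String) (stripped : String) :
    PySem.Dict String String × Option String :=
  let (current, sect) := st
  if PySem.Str.startswith stripped "Identifier:" then
    (current.insert "identifier" (PySem.Str.strip (pvIdx1 (pvSplit1 stripped))), sect)
  else if PySem.Str.startswith stripped "Name:" then
    (current.insert "name" (PySem.Str.strip (pvIdx1 (pvSplit1 stripped))), sect)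
  else if stripped == "Source:" || stripped == "Destination:" || stripped == "Alpha:" || stripped == "Beta:" then
    (current, some (PySem.Str.lower (pvRstripColon stripped)))
  else if PySem.Str.isIn ":" stripped && current.size != 0 then
    let key_val := pvSplit1 stripped
    let key := PySem.Str.lower (PySem.Str.strip ((PySem.List.pyGet? key_val 0).getD ""))
    let value := if 1 < key_val.length then PySem.Str.strip (pvIdx1 key_val) else ""
    -- 'sect' truthiness: None or '' are falsy
    if key == "url" && (sect.getD "") != "" then
      if (sect.getD "") == "source" then (current.insert "source" value, sect)
      else if (sect.getD "") == "destination" then (current.insert "destination" value, sect)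
      else if (sect.getD "") == "alpha" then (current.insert "alpha" value, sect)
      else if (sect.getD "") == "beta" then (current.insert "beta" value, sect)
      else (current, sect)
    else if key == "status" then (current.insert "status" value, sect)
    else (current, sect)
  else (current, sect)

-- 'current and current.get("identifier")' truthiness: dict non-empty and value present and non-empty
def pvKeep (current : PySem.Dict String String) : Bool :=
  current.size != 0 && (current.getD "identifier" "") != ""

-- 'if current and current.get("identifier"): sessions.append(current)' (A runs it at '---' and at the end)
def pvFlush (st : List (List (String × String)) × PySem.Dict String String × Option String) :
    List (List (String × String)) :=
  if pvKeep st.2.1 then st.1 ++ [st.2.1.items] else st.1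

-- A's loop body
def pvStepA (st : List (List (String × String)) × PySem.Dict String String × Option String)
    (line : String) : List (List (String × String)) × PySem.Dict String String × Option String :=
  let (sessions, current, sect) := st
  let stripped := PySem.Str.strip line
  if stripped == "" then (sessions, current, sect)
  else if PySem.Str.startswith stripped "---" then
    (pvFlush (sessions, current, sect), PySem.Dict.empty, none)
  else
    (sessions, pvProcLine (current, sect) stripped)

def parse_sessions_py (output : String) : List (List (String × String)) :=
  pvFlush (((PySem.Str.split? output "\n").getD [output]).foldl pvStepA ([], PySem.Dict.empty, none))

-- ===== PORT B =====
-- _parse_block's loop body (no separator branch; Source B never feeds it one)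
def pvStepB (st : PySem.Dict String String × Option String) (line : String) :
    PySem.Dict String String × Option String :=
  let stripped := PySem.Str.strip line
  if stripped == "" then st else pvProcLine st stripped

def pvParseBlock (lines : List String) : PySem.Dict String String :=
  (lines.foldl pvStepB (PySem.Dict.empty, none)).1

-- phase-1 loop body: start a new block at a '---' line, otherwise extend the current block
def pvSplitStep (st : List (List String) × List String) (line : String) :
    List (List String) × List String :=
  if PySem.Str.startswith (PySem.Str.strip line) "---" then (st.1 ++ [st.2], [])
  else (st.1, st.2 ++ [line])

-- phase-2 loop body: keep a block's dict iff it is non-empty with a truthy identifier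
def pvEmitStep (acc : List (List (String × String))) (b : List String) :
    List (List (String × String)) :=
  let d := pvParseBlock b
  if pvKeep d then acc ++ [d.items] else acc

def parse_sessions_py_alt (output : String) : List (List (String × String)) :=
  let r := ((PySem.Str.split? output "\n").getD [output]).foldl pvSplitStep ([], [])
  (r.1 ++ [r.2]).foldl pvEmitStep []

-- ===== PRECONDITION & SPEC =====
def Spec_parse_sessions_py (output : String) (out : List (List (String × String))) : Prop := out = parse_sessions_py_alt output
instance (output : String) (out : List (List (String × String))) : Decidable (Spec_parse_sessions_py output out) := by unfold Spec_parse_sessions_py; infer_instance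

-- ===== CLAIM (what is proved, stated in full; the proofs are below) =====
def Claim_equal_parse_sessions_py : Prop := ∀ (output : String), Dom_parse_sessions_py output → Spec_parse_sessions_py output (parse_sessions_py output)

-- ===== LEMMAS AND PROOFS =====

-- the sessions a run contributes from mid-block state st onward (proof-only reference function)
def pvEmit (c : PySem.Dict String String) : List (List (String × String)) :=
  if pvKeep c then [c.items] else []

def pvE : List String → PySem.Dict String String × Option String → List (List (String × String))
  | [], st => pvEmit st.1
  | l :: rest, st =>
    let stripped := PySem.Str.strip l
    if stripped == "" then pvE rest st
    else if PySem.Str.startswith stripped "---" then pvEmit st.1 ++ pvE rest (PySem.Dict.empty, none)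
    else pvE rest (pvProcLine st stripped)

-- the blocks still to come, given the partially collected current block
def pvSegs : List String → List String → List (List String)
  | [], cur => [cur]
  | l :: rest, cur =>
    if PySem.Str.startswith (PySem.Str.strip l) "---" then cur :: pvSegs rest []
    else pvSegs rest (cur ++ [l])

def pvF : List (List String) → List (List (String × String))
  | [] => []
  | b :: rest => pvEmit (pvParseBlock b) ++ pvF rest

theorem pvFlush_eq (sess : List (List (String × String))) (c : PySem.Dict String String)
    (s : Option String) : pvFlush (sess, c, s) = sess ++ pvEmit c := by
  unfold pvFlush pvEmit; split <;> simp

theorem pvA_loop (lines : List String) :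
    ∀ (sess : List (List (String × String))) (c : PySem.Dict String String) (s : Option String),
      pvFlush (lines.foldl pvStepA (sess, c, s)) = sess ++ pvE lines (c, s) := by
  induction lines with
  | nil => intro sess c s; simp [pvE, pvFlush_eq]
  | cons l rest ih =>
    intro sess c s
    simp only [List.foldl_cons]
    by_cases h0 : PySem.Str.strip l = ""
    · simp [pvStepA, pvE, h0, ih]
    · by_cases h1 : PySem.Chars.startswith (PySem.Chars.strip l.toList) ['-', '-', '-'] = true
      · simp [pvStepA, pvE, h0, h1, ih, pvFlush_eq]
      · simp [pvStepA, pvE, h0, h1, ih]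

theorem pvSplit_loop (lines : List String) :
    ∀ (bs : List (List String)) (cur : List String),
      (lines.foldl pvSplitStep (bs, cur)).1 ++ [(lines.foldl pvSplitStep (bs, cur)).2]
        = bs ++ pvSegs lines cur := by
  induction lines with
  | nil => intro bs cur; simp [pvSegs]
  | cons l rest ih =>
    intro bs cur
    simp only [List.foldl_cons]
    by_cases h1 : PySem.Chars.startswith (PySem.Chars.strip l.toList) ['-', '-', '-'] = true
    · simp [pvSplitStep, pvSegs, h1, ih]
    · simp [pvSplitStep, pvSegs, h1, ih]

theorem pvEmit_loop (bs : List (List String)) :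
    ∀ (acc : List (List (String × String))), bs.foldl pvEmitStep acc = acc ++ pvF bs := by
  induction bs with
  | nil => intro acc; simp [pvF]
  | cons b rest ih =>
    intro acc
    by_cases h : pvKeep (pvParseBlock b) = true <;>
      simp [pvEmitStep, pvF, pvEmit, h, ih]

theorem pvN (lines : List String) :
    ∀ (cur : List String),
      pvF (pvSegs lines cur) = pvE lines (cur.foldl pvStepB (PySem.Dict.empty, none)) := by
  induction lines with
  | nil => intro cur; simp [pvSegs, pvF, pvE, pvParseBlock]
  | cons l rest ih =>
    intro cur
    by_cases h1 : PySem.Chars.startswith (PySem.Chars.strip l.toList) ['-', '-', '-'] = true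
    · have h0 : ¬ PySem.Str.strip l = "" := by
        intro h
        have h2 : PySem.Chars.strip l.toList = [] := by
          simpa using congrArg String.toList h
        rw [h2] at h1
        exact absurd h1 (by decide)
      have ihe := ih []
      simp only [List.foldl_nil] at ihe
      simp [pvSegs, pvE, pvF, h1, h0, ihe, pvParseBlock]
    · by_cases h0 : PySem.Str.strip l = ""
      · have hstep : List.foldl pvStepB (PySem.Dict.empty, none) (cur ++ [l])
            = List.foldl pvStepB (PySem.Dict.empty, none) cur := by
          rw [List.foldl_append]; simp [pvStepB, h0]
        simp [pvSegs, pvE, PySem.Chars.startswith, h0, ih (cur ++ [l]), hstep]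
      · have hstep : List.foldl pvStepB (PySem.Dict.empty, none) (cur ++ [l])
            = pvProcLine (List.foldl pvStepB (PySem.Dict.empty, none) cur) (PySem.Str.strip l) := by
          rw [List.foldl_append]; simp [pvStepB, h0]
        simp [pvSegs, pvE, h1, h0, ih (cur ++ [l]), hstep]

-- ===== VERDICT (by name: the statement is the Claim_ definition above) =====
theorem parse_sessions_py_spec : Claim_equal_parse_sessions_py := by
  intro output _
  unfold Spec_parse_sessions_py parse_sessions_py parse_sessions_py_alt
  rw [pvA_loop]
  have hsplit := pvSplit_loop ((PySem.Str.split? output "\n").getD [output]) [] []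
  have hE := pvN ((PySem.Str.split? output "\n").getD [output]) []
  simp only [List.foldl_nil] at hE
  simp only [List.nil_append] at hsplit
  simp [pvEmit_loop, hsplit, hE]
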